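-- pv_equiv track=rewrite | github.com/nick-ellison/seating_plan | experiments/prototype.py | count_adjacent_singles
-- ===== SOURCE A (Python) =====
-- def count_adjacent_singles(table):
--     n = len(table)
--     if n == 0:
--         return 0
--     count = 0
--     for i in range(n):
--         if (table[i]['Marital_Status'] == 'Single' and
--                 table[(i + 1) % n]['Marital_Status'] == 'Single'):
--             count += 1
--     return count
-- ===== SOURCE B (Python) =====
-- def count_adjacent_singles(table):
--     flags = [p['Marital_Status'] == 'Single' for p in table]
--     s = sum(flags)
--     if s == len(flags):
--         # all seated are single (or the table is empty): every seat pairs up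
--         return s
--     # closed form: adjacent single pairs = (#singles) - (#maximal runs of singles).
--     # Rotate the flag list to start at a non-single so runs never wrap.
--     k = flags.index(False)
--     rot = flags[k:] + flags[:k]
--     runs = 0
--     prev = False
--     for f in rot:
--         if f and not prev:
--             runs += 1
--         prev = f
--     return s - runs
-- ===== Notes on version B (the rewrite author's own statement) =====
-- stated objective: alternative
-- what changed: Replaces the per-pair modular scan with a closed-form aggregate count: answer = (#singles) - (#maximal runs of singles), computed by rotating the flag list to start at a non-single and counting run starts; the all-single table is the special case answer = n.
import Mathlib
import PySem

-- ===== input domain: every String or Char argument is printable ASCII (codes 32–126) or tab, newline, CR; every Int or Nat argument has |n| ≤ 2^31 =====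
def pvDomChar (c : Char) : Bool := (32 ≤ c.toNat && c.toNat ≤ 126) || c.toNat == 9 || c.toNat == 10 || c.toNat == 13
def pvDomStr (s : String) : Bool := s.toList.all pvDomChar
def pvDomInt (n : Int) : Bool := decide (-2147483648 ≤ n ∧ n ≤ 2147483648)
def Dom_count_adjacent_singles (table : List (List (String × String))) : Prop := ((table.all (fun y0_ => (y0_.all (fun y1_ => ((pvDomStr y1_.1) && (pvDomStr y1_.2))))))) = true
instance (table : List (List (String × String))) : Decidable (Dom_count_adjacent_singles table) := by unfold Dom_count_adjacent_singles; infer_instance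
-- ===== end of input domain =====

-- B replaces A's per-pair modular scan by the closed form
-- (#singles) - (#maximal runs of singles), after rotating the flag list to
-- start at a non-single (all-single tables are the special case answer = n).
-- Each dict is an association list; d['Marital_Status'] = first matching key.

-- ===== PORT A =====
-- row['Marital_Status'] : first-match lookup in the association list (none = KeyError)
def pvLookupMS (row : List (String × String)) : Option String :=
  (row.find? (fun kv => kv.1 == "Marital_Status")).map (·.2)

def count_adjacent_singles (table : List (List (String × String))) : Int :=
  let n : Int := table.length
  if n = 0 then 0
  else
    (PySem.List.pyRange 0 n 1).foldl (fun count i =>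
      if ((PySem.List.pyGet? table i).bind pvLookupMS == some "Single") &&
         ((PySem.List.pyGet? table (PySem.Int.mod (i + 1) n)).bind pvLookupMS == some "Single")
      then count + 1 else count) 0

-- ===== PORT B =====
def count_adjacent_singles_alt (table : List (List (String × String))) : Int :=
  let flags := table.map (fun p => pvLookupMS p == some "Single")
  let s : Int := flags.foldl (fun a f => a + (if f then 1 else 0)) 0
  if s = PySem.List.len flags then s
  else
    let k : Nat := (PySem.List.index? flags false).getD 0
    let rot := PySem.List.slice flags (some (k : Int)) none ++
               PySem.List.slice flags none (some (k : Int))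
    let rp := rot.foldl (fun (st : Int × Bool) f =>
        (if f && !st.2 then st.1 + 1 else st.1, f)) (0, false)
    s - rp.1

-- ===== PRECONDITION & SPEC =====
-- Pre_ excludes exactly the inputs where A raises KeyError: some row without a
-- 'Marital_Status' key (every row is looked up whenever the table is nonempty).
def Pre_count_adjacent_singles (table : List (List (String × String))) : Prop :=
  (table.all (fun row => row.any (fun kv => kv.1 == "Marital_Status"))) = true
instance (table : List (List (String × String))) : Decidable (Pre_count_adjacent_singles table) := by unfold Pre_count_adjacent_singles; infer_instance

def pvWitness_count_adjacent_singles : (List (List (String × String))) :=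
  [[("Marital_Status", "Single")], [("Marital_Status", "Married")]]

def Spec_count_adjacent_singles (table : List (List (String × String))) (out : Int) : Prop := out = count_adjacent_singles_alt table
instance (table : List (List (String × String))) (out : Int) : Decidable (Spec_count_adjacent_singles table out) := by unfold Spec_count_adjacent_singles; infer_instance

-- ===== CLAIM (what is proved, stated in full; the proofs are below) =====
def Claim_equal_count_adjacent_singles : Prop := ∀ (table : List (List (String × String))), Dom_count_adjacent_singles table → Pre_count_adjacent_singles table → Spec_count_adjacent_singles table (count_adjacent_singles table)

-- ===== LEMMAS AND PROOFS =====

-- pair count around the circle, seeded with the previous flag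
def pvPc : Bool → List Bool → Nat
  | _, [] => 0
  | prev, h :: t => (if prev && h then 1 else 0) + pvPc h t

-- number of run starts (rises), seeded with the previous flag
def pvRuns : Bool → List Bool → Nat
  | _, [] => 0
  | prev, h :: t => (if h && !prev then 1 else 0) + pvRuns h t

-- the circular pair count A computes, as a countP over zip with the rotation
def pvZ (l : List Bool) : Nat :=
  (l.zip (l.rotate 1)).countP (fun ab => ab.1 && ab.2)

-- A's fold equals pvZ on the flag list (nonempty table)
theorem pv_A_eq_Z (table : List (List (String × String))) (h0 : table ≠ []) :
    count_adjacent_singles table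
      = (pvZ (table.map (fun p => pvLookupMS p == some "Single")) : Int) := by
  unfold count_adjacent_singles pvZ
  dsimp only
  set s := table.map (fun p => pvLookupMS p == some "Single") with hs
  have hN : 0 < table.length := List.length_pos_iff.mpr h0
  rw [if_neg (by simp only [Int.natCast_eq_zero]; omega)]
  rw [PySem.List.foldl_if_add_one]
  rw [zero_add, Nat.cast_inj]
  have hzip : s.zip (s.rotate 1) =
      (List.range table.length).map
        (fun k => (s.getD k false, s.getD ((k + 1) % table.length) false)) := by
    apply List.ext_getElem
    · simp [hs, List.length_rotate]
    · intro k hk1 hk2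
      have hsl : s.length = table.length := by simp [hs]
      have hk : k < table.length := by
        simpa [hs, List.length_rotate] using hk1
      have hk' : (k + 1) % table.length < table.length := Nat.mod_lt _ hN
      simp only [List.getElem_zip, List.getElem_map, List.getElem_range]
      rw [List.getElem_rotate]
      congr 1
      · rw [List.getD_eq_getElem s false (by omega)]
      · rw [List.getD_eq_getElem s false (by simp [hsl]; omega)]
        congr 1
        simp [hsl]
  rw [hzip, PySem.List.pyRange_zero_natCast, List.countP_map, List.countP_map]
  apply List.countP_congr
  intro k hk
  have hkN : k < table.length := List.mem_range.mp hk
  have hk' : (k + 1) % table.length < table.length := Nat.mod_lt _ hN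
  have hmod : PySem.Int.mod ((k : Int) + 1) (table.length : Int)
      = (((k + 1) % table.length : Nat) : Int) := by
    rw [show ((k : Int) + 1) = (((k + 1 : Nat)) : Int) by push_cast; ring]
    exact PySem.Int.mod_natCast _ _
  simp only [Function.comp]
  rw [hmod]
  rw [PySem.List.pyGet?_natCast, PySem.List.pyGet?_natCast]
  rw [List.getElem?_eq_getElem hkN, List.getElem?_eq_getElem hk']
  simp [hs, List.getElem?_eq_getElem hkN, List.getElem?_eq_getElem hk']

-- the circular pair count is invariant under rotation
theorem pv_zip_rotate (l : List Bool) (k : Nat) :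
    (l.rotate k).zip ((l.rotate k).rotate 1) = (l.zip (l.rotate 1)).rotate k := by
  rw [List.rotate_rotate]
  have hzl : (l.zip (l.rotate 1)).length = l.length := by simp [List.length_rotate]
  apply List.ext_getElem
  · simp [List.length_rotate]
  · intro i hi1 hi2
    have hl : 0 < l.length := by
      rw [List.length_rotate, hzl] at hi2; omega
    have hidx : (i + (k + 1)) % l.length = ((i + k) % l.length + 1) % l.length := by
      rw [show i + (k + 1) = (i + k) + 1 by ring, Nat.add_mod (i + k) 1 l.length]
      conv_rhs => rw [Nat.add_mod ((i + k) % l.length) 1 l.length,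
        Nat.mod_mod_of_dvd _ (dvd_refl l.length)]
    simp only [List.getElem_zip, List.getElem_rotate, hzl, hidx]

theorem pv_Z_rotate (l : List Bool) (k : Nat) : pvZ (l.rotate k) = pvZ l := by
  unfold pvZ
  rw [pv_zip_rotate]
  exact ((l.zip (l.rotate 1)).rotate_perm k).countP_eq _

-- zip against the one-step rotation, counted, is pvPc
theorem pv_zip_pc (t : List Bool) : ∀ (prev a : Bool),
    ((prev :: t).zip (t ++ [a])).countP (fun ab => ab.1 && ab.2)
      = pvPc prev (t ++ [a]) := by
  induction t with
  | nil => intro prev a; simp [pvPc]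
  | cons h tl ih =>
      intro prev a
      simp only [List.cons_append, List.zip_cons_cons, List.countP_cons, pvPc, ih h a]
      by_cases hp : prev && h <;> simp [hp] <;> omega

theorem pv_Z_cons (a : Bool) (t : List Bool) :
    pvZ (a :: t) = pvPc a (t ++ [a]) := by
  unfold pvZ
  rw [show (a :: t).rotate 1 = t ++ [a] by simp [List.rotate_cons_succ]]
  exact pv_zip_pc t a a

-- a trailing false contributes no pair
theorem pv_pc_append_false (xs : List Bool) : ∀ prev,
    pvPc prev (xs ++ [false]) = pvPc prev xs := by
  induction xs with
  | nil => intro prev; simp [pvPc]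
  | cons h t ih => intro prev; simp [pvPc, ih h]

-- #true = #runs + #pairs
theorem pv_count_eq_runs_add_pc (l : List Bool) : ∀ prev,
    l.countP id = pvRuns prev l + pvPc prev l := by
  induction l with
  | nil => intro prev; simp [pvRuns, pvPc]
  | cons h t ih =>
      intro prev
      simp only [List.countP_cons, pvRuns, pvPc, ih h]
      cases h <;> cases prev <;> simp <;> omega

-- an all-true list has as many pairs as elements (seed true)
theorem pv_pc_all_true (l : List Bool) (h : ∀ x ∈ l, x = true) :
    pvPc true l = l.length := by
  induction l with
  | nil => simp [pvPc]
  | cons a t ih =>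
      have ha : a = true := h a (by simp)
      subst ha
      simp [pvPc, ih (fun x hx => h x (by simp [hx]))]
      omega

-- B's sum fold
theorem pv_sum_fold (l : List Bool) : ∀ (a : Int),
    l.foldl (fun a f => a + (if f then 1 else 0)) a = a + (l.countP id : Int) := by
  induction l with
  | nil => intro a; simp
  | cons h t ih =>
      intro a
      simp only [List.foldl_cons, ih, List.countP_cons]
      cases h <;> simp <;> push_cast <;> ring

-- B's runs fold
theorem pv_runs_fold (l : List Bool) : ∀ (acc : Int) (prev : Bool),
    (l.foldl (fun (st : Int × Bool) f =>
        (if f && !st.2 then st.1 + 1 else st.1, f)) (acc, prev)).1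
      = acc + (pvRuns prev l : Int) := by
  induction l with
  | nil => intro acc prev; simp [pvRuns]
  | cons h t ih =>
      intro acc prev
      simp only [List.foldl_cons, pvRuns]
      rw [ih]
      by_cases hp : h && !prev <;> simp [hp] <;> push_cast <;> ring

theorem pv_main (table : List (List (String × String))) :
    count_adjacent_singles table = count_adjacent_singles_alt table := by
  unfold count_adjacent_singles_alt
  dsimp only
  set flags := table.map (fun p => pvLookupMS p == some "Single") with hf
  rw [pv_sum_fold, zero_add, PySem.List.len_eq]
  have hlen : flags.length = table.length := by simp [hf]
  by_cases h0 : table = []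
  · subst h0
    simp only [hf, List.map_nil, List.countP_nil, List.length_nil, Nat.cast_zero]
    simp [count_adjacent_singles]
  · rw [pv_A_eq_Z table h0, ← hf]
    have hN : 0 < table.length := List.length_pos_iff.mpr h0
    by_cases hall : (flags.countP id : Int) = (flags.length : Int)
    · -- all flags true: A counts n
      rw [if_pos hall]
      have hall' : ∀ x ∈ flags, id x = true :=
        List.countP_eq_length.mp (by exact_mod_cast hall)
      obtain ⟨a, t, hat⟩ : ∃ a t, flags = a :: t := by
        cases hfl : flags with
        | nil => exfalso; rw [hfl] at hlen; simp at hlen; omega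
        | cons a t => exact ⟨a, t, rfl⟩
      have ha : a = true := hall' a (by simp [hat])
      subst ha
      rw [show flags.countP id = flags.length from List.countP_eq_length.mpr hall']
      rw [hat, pv_Z_cons]
      rw [pv_pc_all_true _ (by
        intro x hx
        rcases List.mem_append.mp hx with h | h
        · exact hall' x (by simp [hat, h])
        · simp at h; simp [h])]
      simp
    · -- some flag is false
      rw [if_neg hall]
      have hmem : false ∈ flags := by
        by_contra hm
        apply hall
        have : ∀ x ∈ flags, id x = true := by
          intro x hx
          cases x with
          | false => exact absurd hx hm
          | true => rfl
        exact_mod_cast congrArg (Nat.cast (R := Int)) (List.countP_eq_length.mpr this)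
      obtain ⟨k, hk⟩ := Option.isSome_iff_exists.mp
        ((PySem.List.index?_isSome_iff flags false).mpr hmem)
      obtain ⟨hkl, hkv, _⟩ := PySem.List.getElem_of_index?_eq_some hk
      rw [hk]
      simp only [Option.getD_some]
      rw [PySem.List.slice_from_natCast, PySem.List.slice_to_natCast]
      rw [← List.rotate_eq_drop_append_take (by omega)]
      rw [pv_runs_fold, zero_add]
      have hcount : flags.countP id = (flags.rotate k).countP id :=
        ((flags.rotate_perm k).countP_eq id).symm
      have hrot0 : flags.rotate k ≠ [] := by
        intro h
        have := List.length_rotate flags k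
        rw [h] at this
        simp at this
        omega
      obtain ⟨b, t, hbt⟩ : ∃ b t, flags.rotate k = b :: t := by
        cases hc : flags.rotate k with
        | nil => exact absurd hc hrot0
        | cons b t => exact ⟨b, t, rfl⟩
      have hb : b = false := by
        have h0lt : 0 < (flags.rotate k).length := by rw [hbt]; simp
        have hg := List.getElem_rotate flags k 0 h0lt
        rw [List.getElem_of_eq hbt] at hg
        simp only [List.getElem_cons_zero] at hg
        rw [hg]
        simp only [Nat.zero_add, Nat.mod_eq_of_lt hkl]
        exact hkv
      subst hb
      -- Z flags = Z rot = pvPc false rot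
      rw [← pv_Z_rotate flags k, hbt, pv_Z_cons, pv_pc_append_false]
      have hgoal : flags.countP id = pvRuns false (false :: t) + pvPc false t := by
        rw [hcount, hbt, pv_count_eq_runs_add_pc (false :: t) false]
        simp [pvPc]
      rw [hgoal]
      push_cast
      ring

-- ===== VERDICT (by name: the statement is the Claim_ definition above) =====
theorem count_adjacent_singles_spec : Claim_equal_count_adjacent_singles := by
  intro table _ _
  exact pv_main table
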